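-- pv_equiv track=rewrite | github.com/CaptainOnly/cr400t | cr400t.py | to_bits
-- ===== SOURCE A (Python) =====
-- def to_bits(bit_string):
--     if bit_string == '0':
--         return 0b010;
--     if bit_string == '1':
--         return 0b110;
--     bits = 0
--     for c in bit_string:
--         if c == '0':
--             bits = (bits << 3) + 0b010;
--         elif c == '1':
--             bits = (bits << 3) + 0b110;
--         else:
--             raise ValueError()
--     return bits
-- ===== SOURCE B (Python) =====
-- def to_bits(bit_string):
--     if any(c not in '01' for c in bit_string):
--         raise ValueError()
--     n = len(bit_string)
--     return sum((6 if c == '1' else 2) << (3 * (n - 1 - i))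
--                for i, c in enumerate(bit_string))
-- ===== Notes on version B (the rewrite author's own statement) =====
-- stated objective: alternative
-- what changed: Replaces the sequential shift-and-add accumulator (and its redundant single-character early returns) by an up-front validation pass plus a closed-form positional sum: each character's 3-bit code shifted to its final position and summed.
import Mathlib
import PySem

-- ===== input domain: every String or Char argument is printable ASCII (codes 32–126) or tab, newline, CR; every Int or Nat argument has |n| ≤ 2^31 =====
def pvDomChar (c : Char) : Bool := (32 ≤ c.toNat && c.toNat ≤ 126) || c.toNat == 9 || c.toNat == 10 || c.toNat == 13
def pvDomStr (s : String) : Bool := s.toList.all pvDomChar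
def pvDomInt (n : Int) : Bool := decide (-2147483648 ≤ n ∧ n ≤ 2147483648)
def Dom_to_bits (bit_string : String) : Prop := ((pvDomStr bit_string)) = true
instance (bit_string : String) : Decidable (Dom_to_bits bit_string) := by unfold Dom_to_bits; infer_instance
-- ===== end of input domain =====

-- B replaces A's sequential shift-and-add accumulator by a validation pass plus a
-- closed-form positional sum (each char's 3-bit code shifted to its final position);
-- same O(n) cost, genuinely different decomposition (objective: alternative).

-- ===== PORT A =====
-- The fold carries Option Int: none models A's 'raise ValueError()' (excluded by Pre_);
-- the final 'getD 0' is never reached with none inside Pre_.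
def to_bits (bit_string : String) : Int :=
  if bit_string == "0" then 2
  else if bit_string == "1" then 6
  else
    (bit_string.toList.foldl
      (fun ob c =>
        ob.bind (fun bits =>
          if c = '0' then some (bits <<< (3 : Nat) + 2)
          else if c = '1' then some (bits <<< (3 : Nat) + 6)
          else none))
      (some 0)).getD 0

-- ===== PORT B =====
-- 'raise ValueError()' on an invalid character is modelled by returning 0 there;
-- Pre_to_bits excludes exactly those inputs.
def to_bits_alt (bit_string : String) : Int :=
  let l := bit_string.toList
  if l.any (fun c => ¬ (c = '0' ∨ c = '1')) then 0
  else
    ((PySem.List.enumerate l).map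
      (fun p => (if p.2 = '1' then (6 : Int) else 2) <<< (3 * ((l.length : Int) - 1 - p.1)).toNat)).sum

-- ===== PRECONDITION & SPEC =====
-- Pre_ excludes exactly the inputs containing a non-binary character, on which A raises ValueError.
def Pre_to_bits (bit_string : String) : Prop :=
  bit_string.toList.all (fun c => c = '0' || c = '1') = true
instance (bit_string : String) : Decidable (Pre_to_bits bit_string) := by unfold Pre_to_bits; infer_instance
def pvWitness_to_bits : String := "0110"
def Spec_to_bits (bit_string : String) (out : Int) : Prop := out = to_bits_alt bit_string
instance (bit_string : String) (out : Int) : Decidable (Spec_to_bits bit_string out) := by unfold Spec_to_bits; infer_instance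

-- ===== CLAIM (what is proved, stated in full; the proofs are below) =====
def Claim_equal_to_bits : Prop := ∀ (bit_string : String), Dom_to_bits bit_string → Pre_to_bits bit_string → Spec_to_bits bit_string (to_bits bit_string)

-- ===== LEMMAS AND PROOFS =====

def pvCode (c : Char) : Int := if c = '1' then 6 else 2

-- A's Horner fold, on valid characters, starting at b
theorem pvFoldA_eq (l : List Char) (b : Int)
    (h : l.all (fun c => c = '0' || c = '1') = true) :
    (l.foldl
      (fun ob c =>
        ob.bind (fun bits =>
          if c = '0' then some (bits <<< (3 : Nat) + 2)
          else if c = '1' then some (bits <<< (3 : Nat) + 6)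
          else none))
      (some b)) = some (l.foldl (fun bits c => 8 * bits + pvCode c) b) := by
  induction l generalizing b with
  | nil => rfl
  | cons c t ih =>
    simp only [List.all_cons, Bool.and_eq_true, Bool.or_eq_true, decide_eq_true_eq] at h
    obtain ⟨hc, ht⟩ := h
    have hsh : ∀ x : Int, x <<< (3 : Nat) = 8 * x := fun x => by
      rw [Int.shiftLeft_eq]; ring
    rcases hc with hc | hc <;> subst hc <;>
      rw [List.foldl_cons, List.foldl_cons] <;>
      simp only [Char.reduceEq, reduceIte, Option.bind_some] <;>
      rw [hsh, ih _ ht] <;> simp [pvCode]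

-- Horner fold from b in terms of the fold from 0
theorem pvHorner_shift (l : List Char) (b : Int) :
    l.foldl (fun bits c => 8 * bits + pvCode c) b
      = b * 8 ^ l.length + l.foldl (fun bits c => 8 * bits + pvCode c) 0 := by
  induction l generalizing b with
  | nil => simp
  | cons c t ih =>
    simp only [List.foldl_cons, List.length_cons]
    rw [ih (8 * b + pvCode c), ih (8 * 0 + pvCode c)]
    ring

-- B's positional sum, generalized over the start offset s (with s + |l| the fixed total length)
theorem pvSum_eq (l : List Char) (s : Int) (hs : 0 ≤ s) :
    ((PySem.List.enumerate l s).map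
      (fun p => (if p.2 = '1' then (6 : Int) else 2)
          <<< (3 * ((s + (l.length : Int)) - 1 - p.1)).toNat)).sum
      = l.foldl (fun bits c => 8 * bits + pvCode c) 0 := by
  induction l generalizing s with
  | nil => simp [PySem.List.enumerate]
  | cons c t ih =>
    rw [PySem.List.enumerate_cons]
    simp only [List.map_cons, List.sum_cons]
    have h1 : ((s + ((c :: t).length : Int)) - 1 - s) = (t.length : Int) := by
      simp; ring
    have h2 : ∀ p1 : Int, (s + ((c :: t).length : Int)) - 1 - p1
        = ((s + 1) + (t.length : Int)) - 1 - p1 := by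
      intro p1; simp; ring
    have hrec :
        ((PySem.List.enumerate t (s + 1)).map
          (fun p => (if p.2 = '1' then (6 : Int) else 2)
              <<< (3 * ((s + ((c :: t).length : Int)) - 1 - p.1)).toNat)).sum
        = t.foldl (fun bits c => 8 * bits + pvCode c) 0 := by
      rw [show (fun (p : Int × Char) => (if p.2 = '1' then (6 : Int) else 2)
              <<< (3 * ((s + ((c :: t).length : Int)) - 1 - p.1)).toNat)
            = (fun (p : Int × Char) => (if p.2 = '1' then (6 : Int) else 2)
              <<< (3 * (((s + 1) + (t.length : Int)) - 1 - p.1)).toNat) from by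
        funext p; rw [h2 p.1]]
      exact ih (s + 1) (by omega)
    rw [hrec, h1, List.foldl_cons, pvHorner_shift t (8 * 0 + pvCode c)]
    have h3 : (3 * (t.length : Int)).toNat = 3 * t.length := by omega
    have h4 : (if c = '1' then (6 : Int) else 2) = pvCode c := rfl
    rw [h3, h4, Int.shiftLeft_eq, pow_mul]
    push_cast
    ring_nf

theorem pvAlt_eq (bit_string : String)
    (h : bit_string.toList.all (fun c => c = '0' || c = '1') = true) :
    to_bits_alt bit_string
      = bit_string.toList.foldl (fun bits c => 8 * bits + pvCode c) 0 := by
  unfold to_bits_alt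
  have hno : bit_string.toList.any (fun c => ¬ (c = '0' ∨ c = '1')) = false := by
    simp only [List.all_eq_true, Bool.or_eq_true, decide_eq_true_eq] at h
    simp only [List.any_eq_false, decide_eq_true_eq]
    intro c hc; exact not_not_intro (h c hc)
  simp only [hno, Bool.false_eq_true, if_false]
  simpa only [zero_add] using pvSum_eq bit_string.toList 0 le_rfl

-- ===== VERDICT (by name: the statement is the Claim_ definition above) =====
theorem to_bits_spec : Claim_equal_to_bits := by
  intro s _ hpre
  unfold Spec_to_bits
  unfold Pre_to_bits at hpre
  by_cases h0 : s = "0"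
  · subst h0; decide
  · by_cases h1 : s = "1"
    · subst h1; decide
    · unfold to_bits
      rw [if_neg (by simpa using h0), if_neg (by simpa using h1)]
      rw [pvFoldA_eq s.toList 0 hpre, Option.getD_some, pvAlt_eq s hpre]
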